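-- pv_equiv track=rewrite | github.com/linhdvu14/cp-sols | sols/CodeForces/1867_d2/D_Cyclic_Operations.py | solve
-- ===== SOURCE A (Python) =====
-- def solve(N, K, B):
--     if K == 1: return all(i == b - 1 for i, b in enumerate(B))
--
--     seen = [0] * N
--     for i in range(N):
--         if seen[i]: continue
--
--         pos = {}
--         while True:
--             if i in pos and len(pos) - pos[i] != K: return False
--             if seen[i]: break
--             seen[i] = 1
--             pos[i] = len(pos)
--             i = B[i] - 1
--
--     return True
-- ===== SOURCE B (Python) =====
-- def solve(N, K, B):
--     if K == 1:
--         return all(i == b - 1 for i, b in enumerate(B))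
--     f = [b - 1 for b in B]
--     for i in range(N):
--         x = f[i]
--         s = 1
--         while x != i and s < N:
--             x = f[x]
--             s += 1
--         if x == i and s != K:
--             return False
--     return True
-- ===== Notes on version B (the rewrite author's own statement) =====
-- stated objective: alternative
-- what changed: A walks the functional graph once with a shared 'seen' array and a per-walk position dict, checking each newly discovered cycle's length; B drops all shared state and instead, independently for every node, follows f for at most N steps to find that node's minimal period (if any) and rejects when a minimal period differs from K.
-- outside the precondition, e.g. on solve(3, 4, [2, -2, -2]): A returns True, B returns False; on solve(2, 2, [3, 1]): A raises IndexError, B raises IndexError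
import Mathlib
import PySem

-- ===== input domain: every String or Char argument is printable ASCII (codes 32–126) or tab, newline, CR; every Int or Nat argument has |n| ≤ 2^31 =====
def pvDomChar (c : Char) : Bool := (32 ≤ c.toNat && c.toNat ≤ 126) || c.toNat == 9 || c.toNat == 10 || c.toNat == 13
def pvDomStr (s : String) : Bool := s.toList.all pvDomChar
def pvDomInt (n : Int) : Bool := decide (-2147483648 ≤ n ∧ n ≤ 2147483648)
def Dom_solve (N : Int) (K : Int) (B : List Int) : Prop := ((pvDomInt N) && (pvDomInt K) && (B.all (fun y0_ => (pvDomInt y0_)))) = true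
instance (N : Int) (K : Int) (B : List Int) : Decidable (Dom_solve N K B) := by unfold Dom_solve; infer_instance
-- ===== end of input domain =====

-- B replaces A's single shared-state graph walk (seen array + per-walk position dict) by an
-- independent minimal-period search from every node; same result, alternative decomposition (not faster).

-- ===== PORT A =====
-- the 'while True' walk of A: returns none for Python's 'return False', some seen' for 'break'
def solveWalk (K : Int) (B : List Int) : Nat → Int → PySem.Dict Int Int → List Bool → Option (List Bool)
  | 0, _, _, seen => some seen   -- fuel exhaustion; unreachable for the fuel solve supplies
  | fuel+1, i, pos, seen =>
    if PySem.Dict.contains pos i && ((PySem.Dict.size pos : Int) - PySem.Dict.getD pos i 0 != K) then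
      none
    else if PySem.List.pyGetD seen i false then
      some seen
    else
      solveWalk K B fuel (PySem.List.pyGetD B i 0 - 1)
        (PySem.Dict.insert pos i (PySem.Dict.size pos : Int))
        (PySem.List.pySetD seen i true)

-- the body of A's 'for i in range(N)' loop; none = 'return False' already happened
def solveStep (K : Int) (B : List Int) (st : Option (List Bool)) (i : Int) : Option (List Bool) :=
  match st with
  | none => none
  | some seen =>
    if PySem.List.pyGetD seen i false then some seen
    else solveWalk K B (seen.length + 1) i PySem.Dict.empty seen

def solve (N : Int) (K : Int) (B : List Int) : Bool :=
  if K == 1 then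
    (PySem.List.enumerate B).all (fun p => p.1 == p.2 - 1)
  else
    ((PySem.List.pyRange 0 N).foldl (solveStep K B) (some (List.replicate N.toNat false))).isSome

-- ===== PORT B =====
-- B's inner 'while x != i and s < N' loop
def altPeriod (f : List Int) (N : Int) (i : Int) : Nat → Int → Int → Int × Int
  | 0, x, s => (x, s)
  | fuel+1, x, s =>
    if x ≠ i ∧ s < N then altPeriod f N i fuel (PySem.List.pyGetD f x 0) (s + 1)
    else (x, s)

def solve_alt (N : Int) (K : Int) (B : List Int) : Bool :=
  if K == 1 then
    (PySem.List.enumerate B).all (fun p => p.1 == p.2 - 1)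
  else
    let f := B.map (· - 1)
    (PySem.List.pyRange 0 N).all (fun i =>
      let r := altPeriod f N i (N - 1).toNat (PySem.List.pyGetD f i 0) 1
      !(r.1 == i && r.2 != K))

-- ===== PRECONDITION & SPEC =====
-- Pre_ excludes (for K ≠ 1) inputs where N exceeds len(B) (A raises IndexError) or some of the
-- first N values leaves 1..N: there Python's negative-index wraparound makes both programs'
-- results accidents of the indexing (A additionally keys its pos dict by raw negative indices),
-- or they raise IndexError; no behaviour is specified for such non-functional-graph inputs.
def Pre_solve (N : Int) (K : Int) (B : List Int) : Prop :=
  K = 1 ∨ N ≤ 0 ∨ (0 ≤ N ∧ N ≤ (B.length : Int) ∧ ∀ b ∈ B.take N.toNat, 1 ≤ b ∧ b ≤ N)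
instance (N : Int) (K : Int) (B : List Int) : Decidable (Pre_solve N K B) := by unfold Pre_solve; infer_instance
def pvWitness_solve : Int × Int × List Int := (3, 3, [2, 3, 1])

def Spec_solve (N : Int) (K : Int) (B : List Int) (out : Bool) : Prop := out = solve_alt N K B
instance (N : Int) (K : Int) (B : List Int) (out : Bool) : Decidable (Spec_solve N K B out) := by unfold Spec_solve; infer_instance

-- ===== CLAIM (what is proved, stated in full; the proofs are below) =====
def Claim_equal_solve : Prop := ∀ (N : Int) (K : Int) (B : List Int), Dom_solve N K B → Pre_solve N K B → Spec_solve N K B (solve N K B)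

-- ===== LEMMAS AND PROOFS =====

-- the successor function of the functional graph, exactly as both ports compute it
def FB (B : List Int) (x : Int) : Int := PySem.List.pyGetD B x 0 - 1

-- t is the minimal period of node i under iteration of FB
def MinPer (B : List Int) (i : Int) (t : Nat) : Prop :=
  0 < t ∧ (FB B)^[t] i = i ∧ ∀ s : Nat, 0 < s → s < t → (FB B)^[s] i ≠ i

-- "every node of [0,N) that lies on a cycle has minimal period K"
def GoodG (N K : Int) (B : List Int) : Prop :=
  ∀ i : Int, 0 ≤ i → i < N → ∀ t : Nat, MinPer B i t → (t : Int) = K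

def Marked (seen : List Bool) (j : Int) : Prop := PySem.List.pyGetD seen j false = true

-- invariant of A's inner walk: P is the path recorded in pos; the marked set outside P is
-- FB-closed and every cycle inside it has already been checked to have length K
structure WalkInv (N K : Int) (B : List Int) (P : List Int) (i : Int)
    (pos : PySem.Dict Int Int) (seen : List Bool) : Prop where
  hlen : seen.length = N.toNat
  hNodup : P.Nodup
  hPrange : ∀ x ∈ P, 0 ≤ x ∧ x < N
  hlink : ∀ k : Nat, (h : k + 1 < P.length) → FB B (P[k]'(by omega)) = P[k+1]'h
  hlast : ∀ (h : P ≠ []), FB B (P.getLast h) = i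
  hpos_mem : ∀ k : Nat, (h : k < P.length) → PySem.Dict.get? pos (P[k]'h) = some (k : Int)
  hpos_none : ∀ x, x ∉ P → PySem.Dict.get? pos x = none
  hsize : PySem.Dict.size pos = P.length
  hPmarked : ∀ x ∈ P, Marked seen x
  hM0closed : ∀ j, 0 ≤ j → j < N → Marked seen j → j ∉ P → (Marked seen (FB B j) ∧ FB B j ∉ P)
  hM0safe : ∀ j, 0 ≤ j → j < N → Marked seen j → j ∉ P → ∀ t, MinPer B j t → (t : Int) = K

-- invariant of A's outer loop between walks
structure SeenInv (N K : Int) (B : List Int) (seen : List Bool) : Prop where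
  hlen : seen.length = N.toNat
  hclosed : ∀ j, 0 ≤ j → j < N → Marked seen j → Marked seen (FB B j)
  hsafe : ∀ j, 0 ≤ j → j < N → Marked seen j → ∀ t, MinPer B j t → (t : Int) = K

lemma marked_pySetD (seen : List Bool) (i j : Int) (h0 : 0 ≤ i) (h1 : i.toNat < seen.length)
    (j0 : 0 ≤ j) :
    PySem.List.pyGetD (PySem.List.pySetD seen i true) j false =
      if j = i then true else PySem.List.pyGetD seen j false := by
  have hi' : i = ((i.toNat : Nat) : Int) := (Int.toNat_of_nonneg h0).symm
  have hj' : j = ((j.toNat : Nat) : Int) := (Int.toNat_of_nonneg j0).symm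
  rw [hi', hj', PySem.List.pyGetD_pySetD_natCast seen i.toNat j.toNat true false h1]
  split_ifs with h1' h2' h3' <;> first | rfl | omega

lemma path_iter {B : List Int} {P : List Int}
    (hlink : ∀ k : Nat, (h : k + 1 < P.length) → FB B (P[k]'(by omega)) = P[k+1]'h) :
    ∀ (s k : Nat) (h : k + s < P.length), (FB B)^[s] (P[k]'(by omega)) = P[k+s]'h := by
  intro s
  induction s with
  | zero => intro k h; simp
  | succ n ih =>
    intro k h
    rw [Function.iterate_succ_apply']
    have h' : k + n < P.length := by omega
    rw [ih k h']
    exact hlink (k+n) (by omega)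

lemma path_reach {B : List Int} {P : List Int} {i : Int} (hne : P ≠ [])
    (hlink : ∀ k : Nat, (h : k + 1 < P.length) → FB B (P[k]'(by omega)) = P[k+1]'h)
    (hlast : FB B (P.getLast hne) = i) :
    ∀ (k : Nat) (h : k < P.length), (FB B)^[P.length - k] (P[k]'h) = i := by
  intro k h
  have h1 : P.length - k = (P.length - 1 - k) + 1 := by omega
  have e1 : (FB B)^[P.length - 1 - k] (P[k]'h) = P[P.length - 1]'(by omega) := by
    rw [path_iter hlink (P.length - 1 - k) k (by omega)]
    congr 1
    omega
  rw [h1, Function.iterate_succ_apply', e1, ← List.getLast_eq_getElem hne]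
  exact hlast

lemma iter_closed {F : Int → Int} {Q : Int → Prop} (hQ : ∀ j, Q j → Q (F j)) :
    ∀ (s : Nat) (x : Int), Q x → Q (F^[s] x) := by
  intro s
  induction s with
  | zero => intro x hx; simpa using hx
  | succ n ih => intro x hx; rw [Function.iterate_succ_apply']; exact hQ _ (ih x hx)

lemma iter_range (N : Int) (B : List Int)
    (hrange : ∀ x : Int, 0 ≤ x → x < N → 0 ≤ FB B x ∧ FB B x < N)
    {i : Int} (hi0 : 0 ≤ i) (hiN : i < N) (s : Nat) :
    0 ≤ (FB B)^[s] i ∧ (FB B)^[s] i < N :=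
  iter_closed (Q := fun j => 0 ≤ j ∧ j < N) (fun j hj => hrange j hj.1 hj.2) s i ⟨hi0, hiN⟩

lemma minper_le (N : Int) (B : List Int)
    (hrange : ∀ x : Int, 0 ≤ x → x < N → 0 ≤ FB B x ∧ FB B x < N)
    {i : Int} (hi0 : 0 ≤ i) (hiN : i < N)
    {t : Nat} (ht : 0 < t) (hfix : (FB B)^[t] i = i) :
    ∃ t' : Nat, MinPer B i t' ∧ (t' : Int) ≤ N := by
  have hex : ∃ u : Nat, 0 < u ∧ (FB B)^[u] i = i := ⟨t, ht, hfix⟩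
  have hspec := Nat.find_spec hex
  have hmin : ∀ s, s < Nat.find hex → ¬(0 < s ∧ (FB B)^[s] i = i) :=
    fun s hs => Nat.find_min hex hs
  refine ⟨Nat.find hex, ⟨hspec.1, hspec.2, fun s hs1 hs2 hfx => hmin s hs2 ⟨hs1, hfx⟩⟩, ?_⟩
  have key : ∀ a b : Nat, a < b → b < Nat.find hex → (FB B)^[a] i = (FB B)^[b] i → False := by
    intro a b hab hb hfab
    have hd : (Nat.find hex - b) + b = Nat.find hex := by omega
    have h1 : (FB B)^[(Nat.find hex - b) + b] i = i := by rw [hd]; exact hspec.2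
    rw [Function.iterate_add_apply, ← hfab, ← Function.iterate_add_apply] at h1
    exact hmin _ (by omega) ⟨by omega, h1⟩
  have hle := Finset.card_le_card_of_injOn (fun s : Nat => (FB B)^[s] i)
    (s := Finset.range (Nat.find hex)) (t := Finset.Ico (0:Int) N)
    (fun a _ => Finset.mem_Ico.mpr
      ⟨(iter_range N B hrange hi0 hiN a).1, (iter_range N B hrange hi0 hiN a).2⟩)
    (by
      intro a ha b hb hfab
      simp only [Finset.coe_range, Set.mem_Iio] at ha hb
      rcases lt_trichotomy a b with h | h | h
      · exact (key a b h hb hfab).elim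
      · exact h
      · exact (key b a h ha hfab.symm).elim)
  simp only [Finset.card_range, Int.card_Ico] at hle
  omega

lemma cycle_iter {B : List Int} {P : List Int} {p : Nat}
    (hlink : ∀ k : Nat, (h : k + 1 < P.length) → FB B (P[k]'(by omega)) = P[k+1]'h)
    (hp : p < P.length)
    (hclose : FB B (P[P.length - 1]'(by omega)) = P[p]'hp) :
    ∀ (s k : Nat) (hk1 : p ≤ k) (hk2 : k < P.length),
      (FB B)^[s] (P[k]'hk2) =
        P[p + ((k - p + s) % (P.length - p))]'(by
          have : (k - p + s) % (P.length - p) < P.length - p := Nat.mod_lt _ (by omega)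
          omega) := by
  intro s
  induction s with
  | zero =>
    intro k hk1 hk2
    have h1 : (k - p + 0) % (P.length - p) = k - p := by
      rw [Nat.add_zero]; exact Nat.mod_eq_of_lt (by omega)
    simp only [Function.iterate_zero, id, h1]
    congr 1
    omega
  | succ s ih =>
    intro k hk1 hk2
    rw [Function.iterate_succ_apply', ih k hk1 hk2]
    have hm : (k - p + s) % (P.length - p) < P.length - p := Nat.mod_lt _ (by omega)
    set m := (k - p + s) % (P.length - p) with hmdef
    by_cases hcase : m + 1 < P.length - p
    · have e : (k - p + (s+1)) % (P.length - p) = m + 1 := by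
        have h2 : k - p + (s+1) = (k - p + s) + 1 := by omega
        rw [h2, Nat.add_mod, ← hmdef, Nat.mod_eq_of_lt (show (1:Nat) < P.length - p by omega),
          Nat.mod_eq_of_lt (by omega)]
      simp only [e]
      exact hlink (p + m) (by omega)
    · -- m + 1 = P.length - p : wrap around
      have hmL : m + 1 = P.length - p := by omega
      obtain ⟨q, hq⟩ : ∃ q, (P.length - p) * q + ((k - p + s) % (P.length - p)) = k - p + s :=
        ⟨(k - p + s) / (P.length - p), Nat.div_add_mod _ _⟩
      have e : (k - p + (s+1)) % (P.length - p) = 0 := by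
        have h3 : k - p + (s+1) = (P.length - p) * q + (P.length - p) := by omega
        rw [h3, ← Nat.mul_succ, Nat.mul_mod_right]
      simp only [e]
      have h4 : (P[p + m]'(by omega) : Int) = P[P.length - 1]'(by omega) := by
        congr 1
        omega
      rw [h4]
      simpa using hclose

lemma minper_unique {B : List Int} {i : Int} {t t' : Nat}
    (h1 : MinPer B i t) (h2 : MinPer B i t') : t = t' := by
  rcases h1 with ⟨hp, hf, hm⟩
  rcases h2 with ⟨hp', hf', hm'⟩
  rcases lt_trichotomy t t' with h | h | h
  · exact absurd hf (hm' t hp h)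
  · exact h
  · exact absurd hf' (hm t' hp' h)

lemma cycle_minper {B : List Int} {P : List Int} {p : Nat} (hnd : P.Nodup)
    (hlink : ∀ k : Nat, (h : k + 1 < P.length) → FB B (P[k]'(by omega)) = P[k+1]'h)
    (hp : p < P.length)
    (hclose : FB B (P[P.length - 1]'(by omega)) = P[p]'hp)
    (k : Nat) (hk1 : p ≤ k) (hk2 : k < P.length) :
    MinPer B (P[k]'hk2) (P.length - p) := by
  refine ⟨by omega, ?_, ?_⟩
  · rw [cycle_iter hlink hp hclose (P.length - p) k hk1 hk2]
    have e : (k - p + (P.length - p)) % (P.length - p) = k - p := by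
      rw [Nat.add_mod_right]; exact Nat.mod_eq_of_lt (by omega)
    simp only [e]
    congr 1
    omega
  · intro s hs1 hs2 hfx
    rw [cycle_iter hlink hp hclose s k hk1 hk2] at hfx
    have heq := (List.Nodup.getElem_inj_iff hnd).mp hfx
    have hm : (k - p + s) % (P.length - p) < P.length - p := Nat.mod_lt _ (by omega)
    have e2 : (k - p + s) % (P.length - p) = k - p := by omega
    have e3 : (k - p) % (P.length - p) = k - p := Nat.mod_eq_of_lt (by omega)
    have hdvd : (P.length - p) ∣ s := by
      have := (Nat.modEq_iff_dvd' (by omega : k - p ≤ k - p + s)).mp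
        (by unfold Nat.ModEq; rw [e2, e3])
      simpa using this
    exact absurd (Nat.le_of_dvd hs1 hdvd) (by omega)

lemma tail_nonper {B : List Int} {P : List Int} {p : Nat} (hnd : P.Nodup)
    (hlink : ∀ k : Nat, (h : k + 1 < P.length) → FB B (P[k]'(by omega)) = P[k+1]'h)
    (hp : p < P.length)
    (hclose : FB B (P[P.length - 1]'(by omega)) = P[p]'hp)
    (k : Nat) (hk : k < p) (t : Nat) (ht : 0 < t) :
    (FB B)^[t] (P[k]'(by omega)) ≠ P[k]'(by omega) := by
  intro hfx
  by_cases hcase : t ≤ p - k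
  · rw [path_iter hlink t k (by omega)] at hfx
    have := (List.Nodup.getElem_inj_iff hnd).mp hfx
    omega
  · have hsp : t = (t - (p - k)) + (p - k) := by omega
    rw [hsp, Function.iterate_add_apply, path_iter hlink (p - k) k (by omega)] at hfx
    have e1 : (P[k + (p - k)]'(by omega) : Int) = P[p]'hp := by congr 1; omega
    rw [e1, cycle_iter hlink hp hclose (t - (p - k)) p le_rfl hp] at hfx
    have := (List.Nodup.getElem_inj_iff hnd).mp hfx
    omega

lemma map_sub_one_getD (N : Int) (B : List Int) (hNle : N ≤ (B.length : Int))
    {x : Int} (h0 : 0 ≤ x) (h1 : x < N) :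
    PySem.List.pyGetD (B.map (· - 1)) x 0 = FB B x := by
  have hlen : x.toNat < B.length := by omega
  rw [PySem.List.pyGetD_eq_getElem _ _ h0 (by simp; omega), List.getElem_map,
    FB, PySem.List.pyGetD_eq_getElem _ _ h0 (by omega)]

lemma altPeriod_spec (N K : Int) (B : List Int) (hNle : N ≤ (B.length : Int))
    (hrange : ∀ x : Int, 0 ≤ x → x < N → 0 ≤ FB B x ∧ FB B x < N)
    {i : Int} (hi0 : 0 ≤ i) (hiN : i < N) :
    ∀ (fuel : Nat) (c : Nat), 0 < c → (c : Int) + fuel = N →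
      (∀ s : Nat, 0 < s → s < c → (FB B)^[s] i ≠ i) →
      (((altPeriod (B.map (· - 1)) N i fuel ((FB B)^[c] i) (c : Int)).1 = i ∧
        (altPeriod (B.map (· - 1)) N i fuel ((FB B)^[c] i) (c : Int)).2 ≠ K)
       ↔ ∃ t : Nat, MinPer B i t ∧ (t : Int) ≠ K) := by
  intro fuel
  induction fuel with
  | zero =>
    intro c hc hsum hmiss
    simp only [altPeriod]
    by_cases hfix : (FB B)^[c] i = i
    · have hmp : MinPer B i c := ⟨hc, hfix, hmiss⟩
      constructor
      · rintro ⟨-, hne⟩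
        exact ⟨c, hmp, by simpa using hne⟩
      · rintro ⟨t, hmp', hne⟩
        have := minper_unique hmp' hmp
        subst this
        exact ⟨hfix, by simpa using hne⟩
    · constructor
      · rintro ⟨h1, -⟩; exact absurd h1 hfix
      · rintro ⟨t, hmp, -⟩
        obtain ⟨t', hmp', hle⟩ := minper_le N B hrange hi0 hiN hmp.1 hmp.2.1
        have htt : t = t' := minper_unique hmp hmp'
        subst htt
        -- t ≤ N = c, and no s < c hits, so t = c, contradicting hfix
        have : t = c := by
          rcases Nat.lt_or_ge t c with h | h
          · exact absurd hmp.2.1 (hmiss t hmp.1 h)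
          · omega
        subst this
        exact absurd hmp.2.1 hfix
  | succ fuel ih =>
    intro c hc hsum hmiss
    by_cases hfix : (FB B)^[c] i = i
    · have hmp : MinPer B i c := ⟨hc, hfix, hmiss⟩
      simp only [altPeriod, hfix]
      rw [if_neg (by simp)]
      constructor
      · rintro ⟨-, hne⟩
        exact ⟨c, hmp, by simpa using hne⟩
      · rintro ⟨t, hmp', hne⟩
        have := minper_unique hmp' hmp
        subst this
        exact ⟨rfl, by simpa using hne⟩
    · have hcond : ((FB B)^[c] i ≠ i ∧ (c : Int) < N) := ⟨hfix, by omega⟩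
      have hstep : PySem.List.pyGetD (B.map (· - 1)) ((FB B)^[c] i) 0 = (FB B)^[c+1] i := by
        rw [map_sub_one_getD N B hNle (iter_range N B hrange hi0 hiN c).1
          (iter_range N B hrange hi0 hiN c).2]
        exact (Function.iterate_succ_apply' (FB B) c i).symm
      simp only [altPeriod, if_pos hcond, hstep]
      have hcast : (c : Int) + 1 = ((c + 1 : Nat) : Int) := by push_cast; ring
      rw [hcast]
      exact ih (c+1) (by omega) (by push_cast at hsum ⊢; omega)
        (fun s hs1 hs2 => by
          rcases Nat.lt_or_ge s c with h | h
          · exact hmiss s hs1 h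
          · have : s = c := by omega
            subst this; exact hfix)

lemma solveAlt_iff (N K : Int) (B : List Int) (hK : K ≠ 1) (hN : 0 ≤ N)
    (hNle : N ≤ (B.length : Int))
    (hrange : ∀ x : Int, 0 ≤ x → x < N → 0 ≤ FB B x ∧ FB B x < N) :
    (solve_alt N K B = true ↔ GoodG N K B) := by
  have hK1 : (K == 1) = false := by simp [hK]
  have hiff : ∀ i : Int, 0 ≤ i → i < N →
      ((!((altPeriod (B.map (· - 1)) N i (N - 1).toNat
            (PySem.List.pyGetD (B.map (· - 1)) i 0) 1).1 == i &&
          (altPeriod (B.map (· - 1)) N i (N - 1).toNat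
            (PySem.List.pyGetD (B.map (· - 1)) i 0) 1).2 != K)) = true
       ↔ ∀ t : Nat, MinPer B i t → (t : Int) = K) := by
    intro i hi0 hiN
    have hN1 : 1 ≤ N := by omega
    have hini : PySem.List.pyGetD (B.map (· - 1)) i 0 = (FB B)^[1] i := by
      rw [map_sub_one_getD N B hNle hi0 hiN]; simp
    rw [hini]
    have hspec := altPeriod_spec N K B hNle hrange hi0 hiN (N-1).toNat 1 (by omega)
      (by push_cast; omega) (by intro s h1 h2; omega)
    rw [Nat.cast_one] at hspec
    constructor
    · intro h t hmp
      by_contra hne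
      obtain ⟨he1, he2⟩ := hspec.mpr ⟨t, hmp, hne⟩
      rw [Bool.not_eq_true', Bool.and_eq_false_iff] at h
      rcases h with h | h
      · rw [beq_eq_false_iff_ne] at h; exact h he1
      · rw [bne_eq_false_iff_eq] at h; exact he2 h
    · intro hgood
      by_contra h
      simp only [Bool.not_eq_true, Bool.not_eq_false', Bool.and_eq_true, beq_iff_eq,
        bne_iff_ne] at h
      obtain ⟨t, hmp, hne⟩ := hspec.mp h
      exact hne (hgood t hmp)
  unfold solve_alt
  rw [hK1]
  simp only [Bool.false_eq_true, if_false, List.all_eq_true]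
  constructor
  · intro h i hi0 hiN t hmp
    exact (hiff i hi0 hiN).mp (h i (PySem.List.mem_pyRange_one.mpr ⟨hi0, hiN⟩)) t hmp
  · intro hgood i hi
    obtain ⟨hi0, hiN⟩ := PySem.List.mem_pyRange_one.mp hi
    exact (hiff i hi0 hiN).mpr (fun t hmp => hgood i hi0 hiN t hmp)

lemma walkA_spec (N K : Int) (B : List Int)
    (hrange : ∀ x : Int, 0 ≤ x → x < N → 0 ≤ FB B x ∧ FB B x < N) :
    ∀ (fuel : Nat) (P : List Int) (i : Int) (pos : PySem.Dict Int Int) (seen : List Bool),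
      seen.countP (fun b => !b) < fuel →
      0 ≤ i → i < N →
      WalkInv N K B P i pos seen →
      (solveWalk K B fuel i pos seen = none → ¬ GoodG N K B) ∧
      (∀ seen', solveWalk K B fuel i pos seen = some seen' →
        SeenInv N K B seen' ∧ (∀ j, 0 ≤ j → j < N → Marked seen j → Marked seen' j) ∧
        Marked seen' i) := by
  intro fuel
  induction fuel with
  | zero => intro P i pos seen hfuel; omega
  | succ fuel ih =>
    intro P i pos seen hfuel hi0 hiN hinv
    obtain ⟨hlen, hnd, hPr, hlink, hlast, hpm, hpn, hsz, hmk, hcl, hsf⟩ := hinv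
    by_cases hc1 : (PySem.Dict.contains pos i
        && ((PySem.Dict.size pos : Int) - PySem.Dict.getD pos i 0 != K)) = true
    · -- A returns False: the just-closed cycle has length ≠ K
      have hred : solveWalk K B (fuel+1) i pos seen = none := by
        simp only [solveWalk, hc1, if_true]
      refine ⟨fun _ hgood => ?_, fun seen' hs => by rw [hred] at hs; exact absurd hs (by simp)⟩
      obtain ⟨hcont, hne⟩ := Bool.and_eq_true_iff.mp hc1
      have him : i ∈ P := by
        by_contra h
        rw [PySem.Dict.contains_eq_isSome_get?, hpn i h] at hcont
        simp at hcont
      obtain ⟨k, hk, hPk⟩ := List.getElem_of_mem him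
      have hget : PySem.Dict.get? pos i = some (k : Int) := by rw [← hPk]; exact hpm k hk
      have hgd : PySem.Dict.getD pos i 0 = (k : Int) := PySem.Dict.getD_of_get?_eq_some pos 0 hget
      rw [hgd, hsz] at hne
      have hneq : ((P.length : Int) - (k : Int)) ≠ K := by simpa using hne
      have hnem : P ≠ [] := List.ne_nil_of_mem him
      have hclose : FB B (P[P.length - 1]'(by omega)) = P[k]'hk := by
        rw [← List.getLast_eq_getElem hnem, hlast hnem, ← hPk]
      have hmp := cycle_minper hnd hlink hk hclose k le_rfl hk
      rw [hPk] at hmp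
      have := hgood i hi0 hiN _ hmp
      rw [Nat.cast_sub (by omega)] at this
      exact hneq this
    · by_cases hc2 : PySem.List.pyGetD seen i false = true
      · -- break: walk ends, seen unchanged
        have hred : solveWalk K B (fuel+1) i pos seen = some seen := by
          simp only [solveWalk, hc1, hc2, if_true, Bool.false_eq_true, if_false]
        refine ⟨fun h => by rw [hred] at h; exact absurd h (by simp), fun seen' hs => ?_⟩
        rw [hred] at hs
        injection hs with hs
        subst hs
        have hclosed : ∀ j, 0 ≤ j → j < N → Marked seen j → Marked seen (FB B j) := by
          intro j hj0 hjN hmj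
          by_cases hjP : j ∈ P
          · obtain ⟨k, hk, hPk⟩ := List.getElem_of_mem hjP
            by_cases hkl : k + 1 < P.length
            · rw [← hPk, hlink k hkl]
              exact hmk _ (List.getElem_mem hkl)
            · have hnem : P ≠ [] := List.ne_nil_of_mem hjP
              have : FB B j = i := by
                rw [← hPk]
                have e1 : (P[k]'hk : Int) = P.getLast hnem := by
                  rw [List.getLast_eq_getElem hnem]; congr 1; omega
                rw [e1]; exact hlast hnem
              rw [this]; exact hc2
          · exact (hcl j hj0 hjN hmj hjP).1
        refine ⟨⟨hlen, hclosed, ?_⟩, fun j _ _ h => h, hc2⟩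
        intro j hj0 hjN hmj t hmp
        by_cases hjP : j ∈ P
        · obtain ⟨k, hk, hPk⟩ := List.getElem_of_mem hjP
          by_cases hiP : i ∈ P
          · -- the cycle was closed and its length passed the == K test
            obtain ⟨p, hp, hPp⟩ := List.getElem_of_mem hiP
            have hgetp : PySem.Dict.get? pos i = some (p : Int) := by
              rw [← hPp]; exact hpm p hp
            have hcont : PySem.Dict.contains pos i = true := by
              rw [PySem.Dict.contains_eq_isSome_get?, hgetp]; rfl
            have hKeq : (P.length : Int) - (p : Int) = K := by
              rw [hcont] at hc1
              simp only [Bool.true_and, bne_eq_false_iff_eq, Bool.not_eq_true] at hc1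
              rw [← hsz]
              have := PySem.Dict.getD_of_get?_eq_some pos (0:Int) hgetp
              rw [← this]
              exact of_not_not (by simpa using hc1)
            have hnem : P ≠ [] := List.ne_nil_of_mem hiP
            have hclose : FB B (P[P.length - 1]'(by omega)) = P[p]'hp := by
              rw [← List.getLast_eq_getElem hnem, hlast hnem, ← hPp]
            by_cases hkp : p ≤ k
            · have hmp2 := cycle_minper hnd hlink hp hclose k hkp hk
              rw [hPk] at hmp2
              have ht := minper_unique hmp hmp2
              subst ht
              rw [Nat.cast_sub (by omega)]
              exact hKeq
            · exfalso
              have := tail_nonper hnd hlink hp hclose k (by omega) t hmp.1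
              rw [hPk] at this
              exact this hmp.2.1
          · -- i is an old marked node: P is a tail absorbed into the old set, no new cycle
            exfalso
            set Q : Int → Prop := fun x => 0 ≤ x ∧ x < N ∧ Marked seen x ∧ x ∉ P with hQdef
            have hQc : ∀ x, Q x → Q (FB B x) := by
              intro x hx
              obtain ⟨a, b, c, d⟩ := hx
              obtain ⟨c', d'⟩ := hcl x a b c d
              exact ⟨(hrange x a b).1, (hrange x a b).2, c', d'⟩
            have hQi : Q i := ⟨hi0, hiN, hc2, hiP⟩
            have hnem : P ≠ [] := List.ne_nil_of_mem hjP
            have hreach : (FB B)^[P.length - k] j = i := by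
              rw [← hPk]; exact path_reach hnem hlink (hlast hnem) k hk
            have hfixt : (FB B)^[t] j = j := hmp.2.1
            have hd1 : 1 ≤ P.length - k := by omega
            have hmul : (FB B)^[t * (P.length - k)] j = j := by
              have hfp : Function.IsFixedPt ((FB B)^[t]) j := hfixt
              have h2 := hfp.iterate (P.length - k)
              rwa [← Function.iterate_mul] at h2
            have hsp : t * (P.length - k) = (t * (P.length - k) - (P.length - k)) + (P.length - k) := by
              have : P.length - k ≤ t * (P.length - k) := Nat.le_mul_of_pos_left _ hmp.1
              omega
            have hQj : Q j := by
              have h3 : (FB B)^[(t * (P.length - k) - (P.length - k))] ((FB B)^[P.length - k] j) = j := by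
                rw [← Function.iterate_add_apply, ← hsp]; exact hmul
              rw [hreach] at h3
              rw [← h3]
              exact iter_closed hQc _ i hQi
            exact hQj.2.2.2 hjP
        · exact hsf j hj0 hjN hmj hjP t hmp
      · -- i is fresh: mark it, extend the path, recurse
        have hiP : i ∉ P := fun h => hc2 (hmk i h)
        have hred : solveWalk K B (fuel+1) i pos seen =
            solveWalk K B fuel (FB B i) (PySem.Dict.insert pos i (PySem.Dict.size pos : Int))
              (PySem.List.pySetD seen i true) := by
          simp only [solveWalk, hc1, hc2, Bool.false_eq_true, if_false, FB]
        have hIdx : i.toNat < seen.length := by omega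
        have hgetfalse : seen[i.toNat] = false := by
          have he := PySem.List.pyGetD_eq_getElem seen false hi0 (by omega)
          rw [he] at hc2
          exact Bool.not_eq_true _ ▸ (by simpa using hc2)
        have hmset : ∀ j : Int, 0 ≤ j →
            (Marked (PySem.List.pySetD seen i true) j ↔ (j = i ∨ Marked seen j)) := by
          intro j hj
          unfold Marked
          rw [marked_pySetD seen i j hi0 hIdx hj]
          split_ifs with h
          · simp [h]
          · simp [h]
        have hcount : (PySem.List.pySetD seen i true).countP (fun b => !b) =
            seen.countP (fun b => !b) - 1 := by
          rw [PySem.List.pySetD_of_nonneg seen true hi0, List.countP_set hIdx, hgetfalse]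
          simp
        have hcpos : 0 < seen.countP (fun b => !b) := by
          have hmem : false ∈ seen := by rw [← hgetfalse]; exact List.getElem_mem hIdx
          have := List.countP_eq_zero (p := fun b => !b) (l := seen)
          rcases Nat.eq_zero_or_pos (seen.countP (fun b => !b)) with h0 | h0
          · have hx := (this.mp h0) false hmem
            simp at hx
          · exact h0
        have hFi := hrange i hi0 hiN
        -- the new invariant for P ++ [i]
        have hinv' : WalkInv N K B (P ++ [i]) (FB B i)
            (PySem.Dict.insert pos i (PySem.Dict.size pos : Int))
            (PySem.List.pySetD seen i true) := by
          refine ⟨by rw [PySem.List.length_pySetD]; exact hlen, ?_, ?_, ?_, ?_, ?_, ?_, ?_, ?_, ?_, ?_⟩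
          · rw [List.nodup_append]
            refine ⟨hnd, List.nodup_singleton i, ?_⟩
            intro a ha b hb
            rw [List.mem_singleton] at hb
            subst hb
            exact fun h => hiP (h ▸ ha)
          · intro x hx
            rcases List.mem_append.mp hx with h | h
            · exact hPr x h
            · simp at h; subst h; exact ⟨hi0, hiN⟩
          · intro k hklen
            simp only [List.length_append, List.length_singleton] at hklen
            by_cases hkl : k + 1 < P.length
            · rw [List.getElem_append_left (by omega), List.getElem_append_left hkl]
              exact hlink k hkl
            · have hk1 : k + 1 = P.length := by omega
              have hnem : P ≠ [] := by
                intro h; rw [h] at hk1; simp at hk1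
              rw [List.getElem_append_left (by omega)]
              have e1 : (P[k]'(by omega) : Int) = P.getLast hnem := by
                rw [List.getLast_eq_getElem hnem]; congr 1; omega
              have e2 : ((P ++ [i])[k+1]'(by simp; omega) : Int) = i := by
                rw [List.getElem_append_right (by omega), List.getElem_singleton]
              rw [e1, e2]
              exact hlast hnem
          · intro h
            rw [List.getLast_concat]
          · intro k hklen
            simp only [List.length_append, List.length_singleton] at hklen
            by_cases hkl : k < P.length
            · rw [List.getElem_append_left hkl, PySem.Dict.get?_insert]
              rw [if_neg (fun hh => hiP (by rw [← hh]; exact List.getElem_mem hkl))]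
              exact hpm k hkl
            · have hk1 : k = P.length := by omega
              subst hk1
              rw [List.getElem_concat_length rfl, PySem.Dict.get?_insert, if_pos rfl, hsz]
          · intro x hx
            simp only [List.mem_append, List.mem_singleton, not_or] at hx
            rw [PySem.Dict.get?_insert, if_neg hx.2]
            exact hpn x hx.1
          · rw [PySem.Dict.size_insert]
            rw [if_neg ?_]
            · simp [hsz]
            · rw [PySem.Dict.contains_eq_isSome_get?, hpn i hiP]; simp
          · intro x hx
            rcases List.mem_append.mp hx with h | h
            · exact (hmset x (hPr x h).1).mpr (Or.inr (hmk x h))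
            · simp at h; subst h
              exact (hmset x hi0).mpr (Or.inl rfl)
          · intro j hj0 hjN hmj hjP'
            simp only [List.mem_append, List.mem_singleton, not_or] at hjP'
            have hmj' : Marked seen j := by
              rcases (hmset j hj0).mp hmj with h | h
              · exact absurd h hjP'.2
              · exact h
            obtain ⟨hm1, hm2⟩ := hcl j hj0 hjN hmj' hjP'.1
            have hFne : FB B j ≠ i := by
              intro h; rw [h] at hm1; exact hc2 hm1
            refine ⟨(hmset _ (hrange j hj0 hjN).1).mpr (Or.inr hm1), ?_⟩
            simp only [List.mem_append, List.mem_singleton, not_or]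
            exact ⟨hm2, hFne⟩
          · intro j hj0 hjN hmj hjP' t hmp
            simp only [List.mem_append, List.mem_singleton, not_or] at hjP'
            have hmj' : Marked seen j := by
              rcases (hmset j hj0).mp hmj with h | h
              · exact absurd h hjP'.2
              · exact h
            exact hsf j hj0 hjN hmj' hjP'.1 t hmp
        have hih := ih (P ++ [i]) (FB B i)
          (PySem.Dict.insert pos i (PySem.Dict.size pos : Int))
          (PySem.List.pySetD seen i true) (by omega) hFi.1 hFi.2 hinv'
        rw [hred]
        refine ⟨hih.1, fun seen' hs => ?_⟩
        obtain ⟨hsi, hmono, hmi⟩ := hih.2 seen' hs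
        refine ⟨hsi, ?_, ?_⟩
        · intro j hj0 hjN hmj
          exact hmono j hj0 hjN ((hmset j hj0).mpr (Or.inr hmj))
        · exact hmono i hi0 hiN ((hmset i hi0).mpr (Or.inl rfl))

lemma foldl_solveStep_none (K : Int) (B : List Int) (l : List Int) :
    l.foldl (solveStep K B) none = none := by
  induction l with
  | nil => rfl
  | cons x xs ih => simpa [solveStep] using ih

lemma outer_spec (N K : Int) (B : List Int)
    (hrange : ∀ x : Int, 0 ≤ x → x < N → 0 ≤ FB B x ∧ FB B x < N) :
    ∀ (m : Nat) (a : Int) (seen : List Bool), (N - a).toNat ≤ m → 0 ≤ a →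
      SeenInv N K B seen → (∀ j, 0 ≤ j → j < a → Marked seen j) →
      (((PySem.List.pyRange a N).foldl (solveStep K B) (some seen)) = none → ¬ GoodG N K B) ∧
      (∀ s', ((PySem.List.pyRange a N).foldl (solveStep K B) (some seen)) = some s' →
        SeenInv N K B s' ∧ ∀ j, 0 ≤ j → j < N → Marked s' j) := by
  intro m
  induction m with
  | zero =>
    intro a seen hm ha hinv hmark
    have hge : N ≤ a := by omega
    rw [PySem.List.pyRange_one_eq_nil hge]
    exact ⟨fun h => absurd h (by simp), fun s' hs => by
      injection hs with hs
      subst hs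
      exact ⟨hinv, fun j hj0 hjN => hmark j hj0 (by omega)⟩⟩
  | succ m ih =>
    intro a seen hm ha hinv hmark
    by_cases hge : N ≤ a
    · rw [PySem.List.pyRange_one_eq_nil hge]
      exact ⟨fun h => absurd h (by simp), fun s' hs => by
        injection hs with hs
        subst hs
        exact ⟨hinv, fun j hj0 hjN => hmark j hj0 (by omega)⟩⟩
    · have hlt : a < N := by omega
      rw [PySem.List.pyRange_one_cons hlt, List.foldl_cons]
      by_cases hc : PySem.List.pyGetD seen a false = true
      · have hstep : solveStep K B (some seen) a = some seen := by
          simp [solveStep, hc]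
        rw [hstep]
        exact ih (a+1) seen (by omega) (by omega) hinv
          (fun j hj0 hja => by
            rcases lt_or_ge j a with h | h
            · exact hmark j hj0 h
            · have : j = a := by omega
              subst this; exact hc)
      · have hstep : solveStep K B (some seen) a =
            solveWalk K B (seen.length + 1) a PySem.Dict.empty seen := by
          simp [solveStep, hc]
        rw [hstep]
        have hwinv : WalkInv N K B [] a PySem.Dict.empty seen := by
          refine ⟨hinv.hlen, List.nodup_nil, by simp, by simp, ?_, by simp, ?_, ?_, by simp, ?_, ?_⟩
          · intro h; exact absurd rfl h
          · intro x _; exact PySem.Dict.get?_empty x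
          · exact PySem.Dict.size_empty
          · intro j hj0 hjN hmj _
            exact ⟨hinv.hclosed j hj0 hjN hmj, by simp⟩
          · intro j hj0 hjN hmj _ t hmp
            exact hinv.hsafe j hj0 hjN hmj t hmp
        have hw := walkA_spec N K B hrange (seen.length + 1) [] a PySem.Dict.empty seen
          (by have := List.countP_le_length (p := fun b => !b) (l := seen); omega)
          (by omega) hlt hwinv
        cases hwalk : solveWalk K B (seen.length + 1) a PySem.Dict.empty seen with
        | none =>
          rw [foldl_solveStep_none]
          exact ⟨fun _ => hw.1 hwalk, fun s' hs => absurd hs (by simp)⟩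
        | some mid =>
          obtain ⟨hsi, hmono, hma⟩ := hw.2 mid hwalk
          have hlen2 : mid.length = seen.length := by rw [hsi.hlen, hinv.hlen]
          exact ih (a+1) mid (by omega) (by omega) hsi
            (fun j hj0 hja => by
              rcases lt_or_ge j a with h | h
              · exact hmono j hj0 (by omega) (hmark j hj0 h)
              · have : j = a := by omega
                subst this; exact hma)

lemma solveA_iff (N K : Int) (B : List Int) (hK : K ≠ 1) (hN : 0 ≤ N)
    (hrange : ∀ x : Int, 0 ≤ x → x < N → 0 ≤ FB B x ∧ FB B x < N) :
    (solve N K B = true ↔ GoodG N K B) := by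
  have hK1 : (K == 1) = false := by simp [hK]
  unfold solve
  rw [hK1]
  simp only [Bool.false_eq_true, if_false]
  have hinv0 : SeenInv N K B (List.replicate N.toNat false) := by
    have hm : ∀ j : Int, ¬ Marked (List.replicate N.toNat false) j := by
      intro j hmj
      unfold Marked at hmj
      by_cases hr : PySem.Raise.InRange (List.replicate N.toNat false).length j
      · have hmem := PySem.List.pyGetD_mem _ false hr
        have hf := List.eq_of_mem_replicate hmem
        rw [hf] at hmj
        exact absurd hmj (by simp)
      · rw [PySem.List.pyGetD_of_none _ _ _ ((PySem.List.pyGet?_eq_none_iff _ _).mpr hr)] at hmj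
        exact absurd hmj (by simp)
    exact ⟨by simp, fun j hj0 hjN hmj => absurd hmj (hm j),
      fun j hj0 hjN hmj => absurd hmj (hm j)⟩
  obtain ⟨hnone, hsome⟩ := outer_spec N K B hrange (N.toNat) 0 (List.replicate N.toNat false)
    (by omega) le_rfl hinv0 (fun j hj0 hj => by omega)
  cases hr : (PySem.List.pyRange 0 N).foldl (solveStep K B) (some (List.replicate N.toNat false)) with
  | none =>
    simp only [Option.isSome_none, Bool.false_eq_true, false_iff]
    exact hnone hr
  | some s' =>
    simp only [Option.isSome_some, true_iff]
    obtain ⟨hsi, hall⟩ := hsome s' hr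
    exact fun i hi0 hiN t hmp => hsi.hsafe i hi0 hiN (hall i hi0 hiN) t hmp

-- ===== VERDICT (by name: the statement is the Claim_ definition above) =====
theorem solve_spec : Claim_equal_solve := by
  intro N K B hdom hpre
  unfold Spec_solve
  by_cases hK : K = 1
  · subst hK; simp [solve, solve_alt]
  · rcases hpre with h1 | hN0 | ⟨hN, hNle, hB⟩
    · exact absurd h1 hK
    · -- N ≤ 0: both loops are over the empty range and return True
      have hK1 : (K == 1) = false := by simp [hK]
      have hnil : PySem.List.pyRange 0 N = [] := PySem.List.pyRange_one_eq_nil hN0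
      simp [solve, solve_alt, hK1, hnil]
    have hrange : ∀ x : Int, 0 ≤ x → x < N → 0 ≤ FB B x ∧ FB B x < N := by
      intro x hx0 hxN
      have hxlen : x.toNat < B.length := by omega
      have hg : PySem.List.pyGetD B x 0 = B[x.toNat] :=
        PySem.List.pyGetD_eq_getElem B 0 hx0 (by omega)
      have hmem : B[x.toNat] ∈ B.take N.toNat := by
        have h1 : x.toNat < (B.take N.toNat).length := by simp; omega
        have h2 : (B.take N.toNat)[x.toNat]'h1 = B[x.toNat] := List.getElem_take
        rw [← h2]; exact List.getElem_mem h1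
      obtain ⟨hb1, hb2⟩ := hB _ hmem
      unfold FB; rw [hg]; omega
    exact Bool.eq_iff_iff.mpr
      ((solveA_iff N K B hK hN hrange).trans (solveAlt_iff N K B hK hN hNle hrange).symm)
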